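-- pv_equiv track=rewrite | github.com/dyou3968/homeWorkoutProgram | gymSourceMainPageScrape.py | recursiveRemoveExtraWhiteSpace
-- ===== SOURCE A (Python) =====
-- def recursiveRemoveExtraWhiteSpace(L):
--     # Takes in a list with extra entries between the values
--     # And recursively returns a list with the extra whitespace removed
--     if L == []:
--         return []
--     else:
--         firstItem = L[0]
--         rest = recursiveRemoveExtraWhiteSpace(L[1:])
--         if firstItem == "":
--             return rest
--         else:
--             return [firstItem.strip()] + rest
-- ===== SOURCE B (Python) =====
-- def recursiveRemoveExtraWhiteSpace(L):
--     # Iterative version: one pass with an accumulator instead of recursion.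
--     result = []
--     for x in L:
--         if x != "":
--             result.append(x.strip())
--     return result
-- ===== Notes on version B (the rewrite author's own statement) =====
-- stated objective: faster
-- what changed: Replaced the head/tail recursion with repeated list concatenation by a single iterative loop appending to an accumulator.
import Mathlib
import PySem

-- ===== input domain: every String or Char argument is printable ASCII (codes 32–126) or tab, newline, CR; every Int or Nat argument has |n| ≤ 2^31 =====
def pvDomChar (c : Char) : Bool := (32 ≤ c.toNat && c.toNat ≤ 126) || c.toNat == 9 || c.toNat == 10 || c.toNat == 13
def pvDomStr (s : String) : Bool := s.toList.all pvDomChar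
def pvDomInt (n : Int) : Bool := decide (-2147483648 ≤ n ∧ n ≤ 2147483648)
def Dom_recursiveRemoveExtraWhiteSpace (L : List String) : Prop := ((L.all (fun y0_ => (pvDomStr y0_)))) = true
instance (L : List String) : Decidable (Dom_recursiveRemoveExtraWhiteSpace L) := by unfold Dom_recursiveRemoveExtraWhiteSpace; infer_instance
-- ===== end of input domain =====

-- ===== PORT A =====
-- B replaces the head/tail recursion (with list concatenation) by a single iterative
-- accumulator loop; equivalence proved on the full domain.
def recursiveRemoveExtraWhiteSpace (L : List String) : List String :=
  match L with
  | [] => []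
  | firstItem :: restL =>
    let rest := recursiveRemoveExtraWhiteSpace restL
    if firstItem == "" then rest
    else [PySem.Str.strip firstItem] ++ rest

-- ===== PORT B =====
def recursiveRemoveExtraWhiteSpace_alt (L : List String) : List String :=
  L.foldl (fun result x => if x != "" then result ++ [PySem.Str.strip x] else result) []

-- ===== PRECONDITION & SPEC =====
def Spec_recursiveRemoveExtraWhiteSpace (L : List String) (out : List String) : Prop := out = recursiveRemoveExtraWhiteSpace_alt L
instance (L : List String) (out : List String) : Decidable (Spec_recursiveRemoveExtraWhiteSpace L out) := by unfold Spec_recursiveRemoveExtraWhiteSpace; infer_instance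

-- ===== CLAIM (what is proved, stated in full; the proofs are below) =====
def Claim_equal_recursiveRemoveExtraWhiteSpace : Prop := ∀ (L : List String), Dom_recursiveRemoveExtraWhiteSpace L → Spec_recursiveRemoveExtraWhiteSpace L (recursiveRemoveExtraWhiteSpace L)

-- ===== LEMMAS AND PROOFS =====

theorem alt_foldl_acc (acc : List String) (L : List String) :
    L.foldl (fun result x => if x != "" then result ++ [PySem.Str.strip x] else result) acc
      = acc ++ recursiveRemoveExtraWhiteSpace L := by
  induction L generalizing acc with
  | nil => simp [recursiveRemoveExtraWhiteSpace]
  | cons h t ih =>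
    simp only [bne_iff_ne, ne_eq, ite_not] at ih
    by_cases hh : h = ""
    · simp [List.foldl, recursiveRemoveExtraWhiteSpace, hh, ih]
    · simp [List.foldl, recursiveRemoveExtraWhiteSpace, hh, ih]

-- ===== VERDICT (by name: the statement is the Claim_ definition above) =====
theorem recursiveRemoveExtraWhiteSpace_spec : Claim_equal_recursiveRemoveExtraWhiteSpace := by
  intro L _
  unfold Spec_recursiveRemoveExtraWhiteSpace recursiveRemoveExtraWhiteSpace_alt
  exact ((alt_foldl_acc [] L).trans (by simp)).symm
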